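-- pv_equiv track=rewrite | github.com/cabulous/leetcode | python/1163.py | lastSubstring
-- ===== SOURCE A (Python) =====
-- def lastSubstring(s: str) -> str:
--     i = 0
--     j = 1
--     delta = 0
--
--     while j + delta < len(s):
--         if s[i + delta] == s[j + delta]:
--             delta += 1
--             continue
--         elif s[i + delta] > s[j + delta]:
--             j = j + delta + 1
--         else:
--             i = max(i + delta + 1, j)
--             j = i + 1
--         delta = 0
--
--     return s[i:]
-- ===== SOURCE B (Python) =====
-- def lastSubstring(s: str) -> str:
--     if not s:
--         return ''
--     return max(s[i:] for i in range(len(s)))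
-- ===== Notes on version B (the rewrite author's own statement) =====
-- stated objective: simpler
-- what changed: Replaces the two-pointer candidate scan with shared delta by the direct definition: the answer is the lexicographically largest suffix, computed as max(s[i:] for i in range(len(s))), with an explicit guard returning the empty string unchanged when s is empty.
import Mathlib
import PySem

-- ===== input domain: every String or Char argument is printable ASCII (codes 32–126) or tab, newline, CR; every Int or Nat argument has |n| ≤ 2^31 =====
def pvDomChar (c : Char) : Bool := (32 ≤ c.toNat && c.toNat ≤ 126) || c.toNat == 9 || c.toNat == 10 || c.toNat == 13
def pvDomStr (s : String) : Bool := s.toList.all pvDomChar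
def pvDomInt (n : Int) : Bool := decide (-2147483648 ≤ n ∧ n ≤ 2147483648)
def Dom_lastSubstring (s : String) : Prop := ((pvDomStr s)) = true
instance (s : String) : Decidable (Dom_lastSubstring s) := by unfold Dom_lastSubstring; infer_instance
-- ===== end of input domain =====

-- B replaces A's two-pointer candidate scan by the direct definition "maximum over all
-- suffixes" (objective: simpler; B is shorter but not faster — A is the optimized algorithm).

-- ===== PORT A =====
-- A's while loop as fuel recursion; 2*len+1 fuel suffices since i+j+delta grows each step
-- (proved in the lemmas below). s[i+delta]/s[j+delta] are always in range when the guard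
-- holds (the loop keeps i < j and j+delta < len), so getD's default is never read.
def lastSubstringLoop (cs : List Char) (fuel i j delta : Nat) : Nat :=
  match fuel with
  | 0 => i
  | fuel + 1 =>
    if j + delta < cs.length then
      if cs.getD (i + delta) ' ' = cs.getD (j + delta) ' ' then
        lastSubstringLoop cs fuel i j (delta + 1)
      else if cs.getD (j + delta) ' ' < cs.getD (i + delta) ' ' then
        lastSubstringLoop cs fuel i (j + delta + 1) 0
      else
        lastSubstringLoop cs fuel (max (i + delta + 1) j) (max (i + delta + 1) j + 1) 0
    else i

def lastSubstring (s : String) : String :=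
  let cs := s.toList
  String.ofList (cs.drop (lastSubstringLoop cs (2 * cs.length + 1) 0 1 0))

-- ===== PORT B =====
-- Source B: if not s: return ''; return max(s[i:] for i in range(len(s)))
def lastSubstring_alt (s : String) : String :=
  let cs := s.toList
  if cs.isEmpty then ""
  else
    match PySem.List.max? ((PySem.List.pyRange 0 (cs.length : Int) 1).map
        (fun i => PySem.List.slice cs (some i) none)) (fun x => x) with
    | some m => String.ofList m
    | none => ""   -- unreachable: the list of suffixes is nonempty here

-- ===== PRECONDITION & SPEC =====
def Spec_lastSubstring (s : String) (out : String) : Prop := out = lastSubstring_alt s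
instance (s : String) (out : String) : Decidable (Spec_lastSubstring s out) := by unfold Spec_lastSubstring; infer_instance

-- ===== CLAIM (what is proved, stated in full; the proofs are below) =====
def Claim_equal_lastSubstring : Prop := ∀ (s : String), Dom_lastSubstring s → Spec_lastSubstring s (lastSubstring s)

-- ===== LEMMAS AND PROOFS =====

-- lex-order: a first difference at position m (equal below, smaller at m) gives a < b
theorem pvLtOfFirstDiff : ∀ (m : Nat) (a b : List Char),
    (∀ q, q < m → a.getD q ' ' = b.getD q ' ') → m < a.length → m < b.length →
    a.getD m ' ' < b.getD m ' ' → a < b := by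
  intro m
  induction m with
  | zero =>
    intro a b _ ha hb hlt
    match a, b with
    | x :: xs, y :: ys =>
      simp only [List.getD_cons_zero] at hlt
      exact (List.cons_lt_cons_iff).mpr (Or.inl hlt)
  | succ m ih =>
    intro a b heq ha hb hlt
    match a, b with
    | x :: xs, y :: ys =>
      have h0 := heq 0 (Nat.succ_pos m)
      simp only [List.getD_cons_zero] at h0
      refine (List.cons_lt_cons_iff).mpr (Or.inr ⟨h0, ?_⟩)
      refine ih xs ys (fun q hq => ?_) (by simpa using ha) (by simpa using hb)
        (by simpa using hlt)
      have := heq (q + 1) (by omega)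
      simpa using this

-- lex-order: a strict prefix is smaller
theorem pvLtOfPrefix : ∀ (a b : List Char), a.length < b.length →
    (∀ q, q < a.length → a.getD q ' ' = b.getD q ' ') → a < b := by
  intro a
  induction a with
  | nil =>
    intro b hb _
    match b with
    | y :: ys => exact List.nil_lt_cons y ys
  | cons x xs ih =>
    intro b hb heq
    match b with
    | y :: ys =>
      have h0 := heq 0 (by simp)
      simp only [List.getD_cons_zero] at h0
      refine (List.cons_lt_cons_iff).mpr (Or.inr ⟨h0, ?_⟩)
      refine ih ys (by simpa using hb) (fun q hq => ?_)
      have := heq (q + 1) (by simpa using Nat.succ_lt_succ hq)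
      simpa using this

theorem pvGetDDrop (cs : List Char) (t q : Nat) :
    (cs.drop t).getD q ' ' = cs.getD (t + q) ' ' := by
  by_cases h : t + q < cs.length
  · rw [List.getD_eq_getElem _ _ (by simp [List.length_drop]; omega),
        List.getD_eq_getElem _ _ h, List.getElem_drop]
  · rw [List.getD_eq_default _ _ (by simp [List.length_drop]; omega),
        List.getD_eq_default _ _ (by omega)]

-- the matched block s[i:i+delta] = s[j:j+delta] makes suffix t smaller than suffix t-(j-i)
-- when the comparison went i's way (s[j+delta] < s[i+delta]), for any t in [j, j+delta]
theorem pvShiftA (cs : List Char) (i j delta : Nat) (hij : i < j)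
    (hjd : j + delta < cs.length)
    (hmatch : ∀ m, m < delta → cs.getD (i + m) ' ' = cs.getD (j + m) ' ')
    (hgt : cs.getD (j + delta) ' ' < cs.getD (i + delta) ' ') :
    ∀ t, j ≤ t → t ≤ j + delta → cs.drop t < cs.drop (t - (j - i)) := by
  intro t ht1 ht2
  refine pvLtOfFirstDiff (j + delta - t) _ _ (fun q hq => ?_) ?_ ?_ ?_
  · rw [pvGetDDrop, pvGetDDrop]
    have h := hmatch (t - (j - i) + q - i) (by omega)
    have e1 : i + (t - (j - i) + q - i) = t - (j - i) + q := by omega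
    have e2 : j + (t - (j - i) + q - i) = t + q := by omega
    rw [e1, e2] at h
    exact h.symm
  · simp only [List.length_drop]; omega
  · simp only [List.length_drop]; omega
  · rw [pvGetDDrop, pvGetDDrop]
    have e1 : t + (j + delta - t) = j + delta := by omega
    have e2 : t - (j - i) + (j + delta - t) = i + delta := by omega
    rw [e1, e2]; exact hgt

-- symmetric: when the comparison went j's way, suffix t < suffix t+(j-i) for t in [i, i+delta]
theorem pvShiftB (cs : List Char) (i j delta : Nat) (hij : i < j)
    (hjd : j + delta < cs.length)
    (hmatch : ∀ m, m < delta → cs.getD (i + m) ' ' = cs.getD (j + m) ' ')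
    (hlt : cs.getD (i + delta) ' ' < cs.getD (j + delta) ' ') :
    ∀ t, i ≤ t → t ≤ i + delta → cs.drop t < cs.drop (t + (j - i)) := by
  intro t ht1 ht2
  refine pvLtOfFirstDiff (i + delta - t) _ _ (fun q hq => ?_) ?_ ?_ ?_
  · rw [pvGetDDrop, pvGetDDrop]
    have h := hmatch (t + q - i) (by omega)
    have e1 : i + (t + q - i) = t + q := by omega
    have e2 : j + (t + q - i) = t + (j - i) + q := by omega
    rw [e1, e2] at h
    exact h
  · simp only [List.length_drop]; omega
  · simp only [List.length_drop]; omega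
  · rw [pvGetDDrop, pvGetDDrop]
    have e1 : t + (i + delta - t) = i + delta := by omega
    have e2 : t + (j - i) + (i + delta - t) = j + delta := by omega
    rw [e1, e2]; exact hlt

-- at the end of the string (j+delta = len): suffix t is a proper prefix of suffix t-(j-i)
theorem pvShiftC (cs : List Char) (i j delta : Nat) (hij : i < j)
    (hend : j + delta = cs.length)
    (hmatch : ∀ m, m < delta → cs.getD (i + m) ' ' = cs.getD (j + m) ' ') :
    ∀ t, j ≤ t → t < cs.length → cs.drop t < cs.drop (t - (j - i)) := by
  intro t ht1 ht2
  refine pvLtOfPrefix _ _ ?_ (fun q hq => ?_)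
  · simp only [List.length_drop]; omega
  · rw [pvGetDDrop, pvGetDDrop]
    simp only [List.length_drop] at hq
    have h := hmatch (t - (j - i) + q - i) (by omega)
    have e1 : i + (t - (j - i) + q - i) = t - (j - i) + q := by omega
    have e2 : j + (t - (j - i) + q - i) = t + q := by omega
    rw [e1, e2] at h
    exact h.symm

-- chaining pvShiftA down by the period j-i: every t in [j, j+delta] is beaten by some u < j
theorem pvChainA (cs : List Char) (i j delta : Nat) (hij : i < j)
    (hjd : j + delta < cs.length)
    (hmatch : ∀ m, m < delta → cs.getD (i + m) ' ' = cs.getD (j + m) ' ')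
    (hgt : cs.getD (j + delta) ' ' < cs.getD (i + delta) ' ') :
    ∀ t, j ≤ t → t ≤ j + delta → ∃ u, i ≤ u ∧ u < j ∧ cs.drop t < cs.drop u := by
  intro t
  induction t using Nat.strong_induction_on with
  | _ t ih =>
    intro ht1 ht2
    have hstep := pvShiftA cs i j delta hij hjd hmatch hgt t ht1 ht2
    by_cases hu : t - (j - i) < j
    · exact ⟨t - (j - i), by omega, hu, hstep⟩
    · obtain ⟨u, hu1, hu2, hu3⟩ := ih (t - (j - i)) (by omega) (by omega) (by omega)
      exact ⟨u, hu1, hu2, lt_trans hstep hu3⟩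

theorem pvChainC (cs : List Char) (i j delta : Nat) (hij : i < j)
    (hend : j + delta = cs.length)
    (hmatch : ∀ m, m < delta → cs.getD (i + m) ' ' = cs.getD (j + m) ' ') :
    ∀ t, j ≤ t → t < cs.length → ∃ u, i ≤ u ∧ u < j ∧ cs.drop t < cs.drop u := by
  intro t
  induction t using Nat.strong_induction_on with
  | _ t ih =>
    intro ht1 ht2
    have hstep := pvShiftC cs i j delta hij hend hmatch t ht1 ht2
    by_cases hu : t - (j - i) < j
    · exact ⟨t - (j - i), by omega, hu, hstep⟩
    · obtain ⟨u, hu1, hu2, hu3⟩ := ih (t - (j - i)) (by omega) (by omega) (by omega)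
      exact ⟨u, hu1, hu2, lt_trans hstep hu3⟩

-- terminal state: any maximizing start M in {i} ∪ [j, len) must be i itself
theorem pvFinal (cs : List Char) (M i j delta : Nat) (hMn : M < cs.length)
    (hM : ∀ k, k < cs.length → cs.drop k ≤ cs.drop M)
    (hij : i < j) (hend : j + delta = cs.length)
    (hmatch : ∀ m, m < delta → cs.getD (i + m) ' ' = cs.getD (j + m) ' ')
    (hgood : M = i ∨ j ≤ M) : i = M := by
  rcases hgood with h | h
  · exact h.symm
  · exfalso
    rcases Nat.eq_zero_or_pos delta with hd | hd
    · omega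
    · obtain ⟨u, hu1, hu2, hu3⟩ := pvChainC cs i j delta hij hend hmatch M h hMn
      exact absurd hu3 (not_lt.mpr (hM u (by omega)))

-- the loop invariant: with enough fuel the loop returns any maximizing start M
theorem pvLoopEqMax (cs : List Char) (M : Nat) (hMn : M < cs.length)
    (hM : ∀ k, k < cs.length → cs.drop k ≤ cs.drop M) :
    ∀ fuel i j delta, 2 * cs.length ≤ i + j + delta + fuel → i < j →
    j + delta ≤ cs.length →
    (∀ m, m < delta → cs.getD (i + m) ' ' = cs.getD (j + m) ' ') →
    (M = i ∨ j ≤ M) →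
    lastSubstringLoop cs fuel i j delta = M := by
  intro fuel
  induction fuel with
  | zero =>
    intro i j delta hfuel hij hjd hmatch hgood
    by_cases hg : j + delta < cs.length
    · omega
    · exact pvFinal cs M i j delta hMn hM hij (by omega) hmatch hgood
  | succ fuel ih =>
    intro i j delta hfuel hij hjd hmatch hgood
    rw [lastSubstringLoop]
    by_cases hg : j + delta < cs.length
    · rw [if_pos hg]
      by_cases heq : cs.getD (i + delta) ' ' = cs.getD (j + delta) ' '
      · rw [if_pos heq]
        refine ih i j (delta + 1) (by omega) hij (by omega) (fun m hm => ?_) hgood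
        rcases Nat.lt_succ_iff_lt_or_eq.mp hm with h | h
        · exact hmatch m h
        · subst h; exact heq
      · rw [if_neg heq]
        by_cases hgt : cs.getD (j + delta) ' ' < cs.getD (i + delta) ' '
        · rw [if_pos hgt]
          refine ih i (j + delta + 1) 0 (by omega) (by omega) (by omega)
            (by omega) ?_
          rcases hgood with h | h
          · exact Or.inl h
          · by_cases hM2 : j + delta + 1 ≤ M
            · exact Or.inr hM2
            · exfalso
              obtain ⟨u, hu1, hu2, hu3⟩ :=
                pvChainA cs i j delta hij hg hmatch hgt M h (by omega)
              exact absurd hu3 (not_lt.mpr (hM u (by omega)))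
        · rw [if_neg hgt]
          have hlt : cs.getD (i + delta) ' ' < cs.getD (j + delta) ' ' :=
            lt_of_le_of_ne (not_lt.mp hgt) heq
          refine ih (max (i + delta + 1) j) (max (i + delta + 1) j + 1) 0
            (by omega) (by omega) (by omega) (by omega) ?_
          -- M is not i and not in [j, i+delta]: pvShiftB beats those suffixes
          have hMnot : ∀ t, i ≤ t → t ≤ i + delta → M ≠ t := by
            intro t ht1 ht2 hMt
            subst hMt
            have hstep := pvShiftB cs i j delta hij hg hmatch hlt M ht1 ht2
            exact absurd hstep (not_lt.mpr (hM (M + (j - i)) (by omega)))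
          rcases hgood with h | h
          · exact absurd h (hMnot i (le_refl i) (by omega))
          · by_cases hM2 : M ≤ i + delta
            · exact absurd rfl (hMnot M (by omega) hM2)
            · omega
    · rw [if_neg hg]
      exact pvFinal cs M i j delta hMn hM hij (by omega) hmatch hgood

-- bridge for PySem.List.max?: the two DecidableLT instances on List Char coincide
theorem pvInstEqLT : (fun (a b : List Char) => a.decidableLT b) =
    (LinearOrder.toDecidableLT (α := List Char)) := by
  funext a b; exact Subsingleton.elim _ _

-- B's candidate list is exactly the suffixes drop 0, …, drop (n-1)
theorem pvAltList (cs : List Char) :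
    (PySem.List.pyRange 0 (cs.length : Int) 1).map
      (fun i => PySem.List.slice cs (some i) none) =
    (List.range cs.length).map (fun k => cs.drop k) := by
  rw [PySem.List.pyRange_zero_natCast, List.map_map]
  refine List.map_congr_left (fun k hk => ?_)
  simp [PySem.List.slice_from_natCast]

theorem pvMain (s : String) : lastSubstring s = lastSubstring_alt s := by
  rcases he : s.toList with _ | ⟨c, cs'⟩
  · simp [lastSubstring, lastSubstring_alt, he, lastSubstringLoop]
  · -- nonempty: pick a maximizing suffix start M
    set cs := s.toList with hcs
    have hne : cs ≠ [] := by rw [he]; simp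
    have hn : 0 < cs.length := List.length_pos_iff.mpr hne
    obtain ⟨M, hMmem, hMmax⟩ := Finset.exists_max_image (Finset.range cs.length)
      (fun k => cs.drop k) ⟨0, Finset.mem_range.mpr hn⟩
    have hMn : M < cs.length := Finset.mem_range.mp hMmem
    have hM : ∀ k, k < cs.length → cs.drop k ≤ cs.drop M :=
      fun k hk => hMmax k (Finset.mem_range.mpr hk)
    have hA : lastSubstring s = String.ofList (cs.drop M) := by
      have := pvLoopEqMax cs M hMn hM (2 * cs.length + 1) 0 1 0 (by omega)
        (by omega) (by omega) (by omega) (by omega)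
      simp only [lastSubstring, ← hcs, this]
    have hB : lastSubstring_alt s = String.ofList (cs.drop M) := by
      unfold lastSubstring_alt
      rw [← hcs]
      rw [if_neg (by simp [List.isEmpty_iff, hne])]
      rw [pvAltList]
      rcases hmx : PySem.List.max? ((List.range cs.length).map (fun k => cs.drop k))
          (fun x => x) with _ | m
      · rw [PySem.List.max?_eq_none_iff] at hmx
        rw [List.map_eq_nil_iff, List.range_eq_nil] at hmx
        omega
      · have hmem := PySem.List.max?_mem hmx
        rw [pvInstEqLT] at hmx
        have hmax := PySem.List.max?_isMax hmx
        simp only [List.mem_map, List.mem_range] at hmem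
        obtain ⟨k, hk, hkm⟩ := hmem
        have h1 : m ≤ cs.drop M := hkm ▸ hM k hk
        have h2 : cs.drop M ≤ m :=
          hmax (cs.drop M) (List.mem_map.mpr ⟨M, List.mem_range.mpr hMn, rfl⟩)
        rw [le_antisymm h1 h2]
    rw [hA, hB]

-- ===== VERDICT (by name: the statement is the Claim_ definition above) =====
theorem lastSubstring_spec : Claim_equal_lastSubstring := by
  intro s _
  unfold Spec_lastSubstring
  exact pvMain s
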